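-- pv_equiv track=rewrite | github.com/acejjin77/BJ-Python | backtraking/backup.py | solution
-- ===== SOURCE A (Python) =====
-- def solution(N, coffee_times):
--     answer = []
--
--     while len(answer) < len(coffee_times):
--         fin = 0
--         count = 0
--         while (count < N) and (count + fin < len(coffee_times)):
--             if coffee_times[count + fin] > 0:
--                 coffee_times[count + fin] -= 1
--                 count += 1
--             elif coffee_times[count + fin] == 0:
--                 coffee_times[count + fin] -= 1
--                 answer.append(count + fin + 1)
--                 fin += 1
--             else:
--                 fin += 1
--
--     return (answer)
-- ===== SOURCE B (Python) =====
-- # Same return value as A; B is purely functional: A mutates coffee_times in place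
-- # (equivalence is about the return value only; B does not mutate its argument).
-- def solution(N, coffee_times):
--     pend = [(i + 1, r) for i, r in enumerate(coffee_times)]
--     answer = []
--     while pend:
--         keep = []
--         budget = N
--         k = 0
--         while k < len(pend) and budget > 0:
--             idx, r = pend[k]
--             if r == 0:
--                 answer.append(idx)
--             else:
--                 keep.append((idx, r - 1))
--                 budget -= 1
--             k += 1
--         pend = keep + pend[k:]
--     return answer
-- ===== Notes on version B (the rewrite author's own statement) =====
-- stated objective: alternative
-- what changed: B replaces A's in-place array mutation and count+fin index bookkeeping (re-scanning -1 sentinels of finished items every pass) by a purely functional round over a shrinking list of (index, remaining) pairs from which finished items are dropped; A also mutates coffee_times in place, B does not (equivalence is about the return value).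
import Mathlib
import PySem

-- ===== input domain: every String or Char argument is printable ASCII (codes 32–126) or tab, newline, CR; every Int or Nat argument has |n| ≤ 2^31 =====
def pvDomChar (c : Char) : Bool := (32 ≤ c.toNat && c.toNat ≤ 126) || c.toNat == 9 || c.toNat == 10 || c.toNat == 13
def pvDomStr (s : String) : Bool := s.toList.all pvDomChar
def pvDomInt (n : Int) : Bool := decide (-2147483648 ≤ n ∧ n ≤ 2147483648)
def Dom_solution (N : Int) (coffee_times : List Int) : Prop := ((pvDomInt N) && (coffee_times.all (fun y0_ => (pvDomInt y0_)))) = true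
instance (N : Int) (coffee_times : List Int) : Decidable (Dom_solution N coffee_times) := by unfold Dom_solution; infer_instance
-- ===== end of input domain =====

-- B replaces A's in-place mutation with count+fin index bookkeeping over the whole array
-- by a functional round over a shrinking list of (index, remaining) pairs (finished items
-- are dropped instead of left as -1 sentinels); objective: alternative, same cost.
-- Python A mutates coffee_times in place; the equivalence proved here is about the
-- RETURN value only (B does not mutate its argument).

-- ===== PORT A =====
-- Fuel bound on the number of outer passes, shared by both ports' otherwise identical
-- outer while loops (which Python cannot be shown to terminate outside Pre_): inside
-- Pre_ every pass performs at least one decrement or append, so sum + length + 1 passes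
-- suffice; excess fuel is harmless (the loop body is a no-op once the answer is full).
def pvFuel (coffee_times : List Int) : Nat :=
  coffee_times.foldl (fun a v => a + (max v 0).toNat) 0 + coffee_times.length + 1

-- Inner while loop of A as the obvious left-to-right zipper: 'done' is the scanned prefix.
-- Mutation happens only at the scan point count+fin, which always equals done.length, so
-- Python's guard 'count + fin < len(coffee_times)' is 'todo ≠ []'.
def solInner (N : Int) (done todo ans : List Int) (count fin : Int) : List Int × List Int :=
  if count < N then
    match todo with
    | [] => (done, ans)
    | r :: rest =>
      if r > 0 then solInner N (done ++ [r - 1]) rest ans (count + 1) fin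
      else if r = 0 then
        solInner N (done ++ [(-1 : Int)]) rest (ans ++ [count + fin + 1]) count (fin + 1)
      else solInner N (done ++ [r]) rest ans count (fin + 1)
  else (done ++ todo, ans)

def solOuter (fuel : Nat) (N : Int) (ct ans : List Int) : List Int :=
  match fuel with
  | 0 => ans
  | fuel + 1 =>
    if ans.length < ct.length then
      let st := solInner N [] ct ans 0 0
      solOuter fuel N st.1 st.2
    else ans

def solution (N : Int) (coffee_times : List Int) : List Int :=
  solOuter (pvFuel coffee_times) N coffee_times []

-- ===== PORT B =====
-- Source B's inner 'while k < len(pend) and budget > 0' loop, consuming pend head-first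
-- (k is the number of consumed entries); the final 'keep + pend[k:]' is the else-branch.
def passLoop (budget : Int) (pend : List (Int × Int)) (keep : List (Int × Int))
    (ans : List Int) : List (Int × Int) × List Int :=
  match pend with
  | [] => (keep, ans)
  | (idx, r) :: rest =>
    if budget > 0 then
      if r = 0 then passLoop budget rest keep (ans ++ [idx])
      else passLoop (budget - 1) rest (keep ++ [(idx, r - 1)]) ans
    else (keep ++ (idx, r) :: rest, ans)

def altOuter (fuel : Nat) (N : Int) (pend : List (Int × Int)) (ans : List Int) : List Int :=
  match fuel with
  | 0 => ans
  | fuel + 1 =>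
    match pend with
    | [] => ans
    | _ :: _ =>
      let st := passLoop N pend [] ans
      altOuter fuel N st.1 st.2

def solution_alt (N : Int) (coffee_times : List Int) : List Int :=
  altOuter (pvFuel coffee_times) N (PySem.List.enumerate coffee_times 1) []

-- ===== PRECONDITION & SPEC =====
-- Pre_ excludes exactly the inputs on which Python A never returns (it loops forever):
-- a nonempty list with N ≤ 0 (no pass makes progress), or a negative entry (that entry
-- is never appended, so the answer never fills up).
def Pre_solution (N : Int) (coffee_times : List Int) : Prop :=
  (1 ≤ N ∨ coffee_times = []) ∧ ∀ v ∈ coffee_times, 0 ≤ v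
instance (N : Int) (coffee_times : List Int) : Decidable (Pre_solution N coffee_times) := by
  unfold Pre_solution; infer_instance

def pvWitness_solution : Int × List Int := (2, [1, 0, 3])

def Spec_solution (N : Int) (coffee_times : List Int) (out : List Int) : Prop := out = solution_alt N coffee_times
instance (N : Int) (coffee_times : List Int) (out : List Int) : Decidable (Spec_solution N coffee_times out) := by unfold Spec_solution; infer_instance

-- ===== CLAIM (what is proved, stated in full; the proofs are below) =====
def Claim_equal_solution : Prop := ∀ (N : Int) (coffee_times : List Int), Dom_solution N coffee_times → Pre_solution N coffee_times → Spec_solution N coffee_times (solution N coffee_times)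

-- ===== LEMMAS AND PROOFS =====

-- The nonnegative entries of A's array, with their 1-based positions: B's pend list.
def filterNN (i : Int) : List Int → List (Int × Int)
  | [] => []
  | r :: rest => if 0 ≤ r then (i, r) :: filterNN (i + 1) rest else filterNN (i + 1) rest

lemma filterNN_all_nonneg (ct : List Int) : ∀ (i : Int), (∀ v ∈ ct, 0 ≤ v) →
    filterNN i ct = PySem.List.enumerate ct i := by
  induction ct with
  | nil => intro i _; simp [filterNN, PySem.List.enumerate_nil]
  | cons r rest ih =>
    intro i h
    have hr : 0 ≤ r := h r (by simp)
    simp [filterNN, hr, PySem.List.enumerate_cons, ih (i + 1) (fun v hv => h v (by simp [hv]))]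

lemma filterNN_length_le (ct : List Int) : ∀ (i : Int), (filterNN i ct).length ≤ ct.length := by
  induction ct with
  | nil => intro i; simp [filterNN]
  | cons r rest ih =>
    intro i
    by_cases hr : 0 ≤ r <;> simp [filterNN, hr] <;>
      exact le_trans (ih (i + 1)) (by omega)

-- One pass of A (from any scan point) is simulated by one pass of B on the
-- corresponding pend suffix, for every budget and every accumulator.
lemma filterNN_cons_pos (i r : Int) (rest : List Int) (h : 0 ≤ r) :
    filterNN i (r :: rest) = (i, r) :: filterNN (i + 1) rest := by simp [filterNN, h]

lemma filterNN_cons_neg (i r : Int) (rest : List Int) (h : ¬ 0 ≤ r) :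
    filterNN i (r :: rest) = filterNN (i + 1) rest := by simp [filterNN, h]

lemma len_snoc_cast (done : List Int) (x : Int) :
    (((done ++ [x]).length : Int)) = (done.length : Int) + 1 := by simp

lemma pass_sim (N : Int) (todo : List Int) :
    ∀ (done ans : List Int) (keep : List (Int × Int)) (count fin : Int),
    count + fin = (done.length : Int) →
    ∃ (todo' ansApp : List Int),
      solInner N done todo ans count fin = (done ++ todo', ans ++ ansApp) ∧
      passLoop (N - count) (filterNN ((done.length : Int) + 1) todo) keep ans
        = (keep ++ filterNN ((done.length : Int) + 1) todo', ans ++ ansApp) ∧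
      todo'.length = todo.length ∧
      (filterNN ((done.length : Int) + 1) todo').length + ansApp.length
        = (filterNN ((done.length : Int) + 1) todo).length := by
  induction todo with
  | nil =>
    intro done ans keep count fin h
    refine ⟨[], [], ?_, ?_, rfl, by simp⟩
    · by_cases hc : count < N <;> simp [solInner, hc]
    · simp [filterNN, passLoop]
  | cons r rest ih =>
    intro done ans keep count fin h
    by_cases hc : count < N
    · by_cases hr : r > 0
      · -- decrement branch
        obtain ⟨todo'', ansApp, hA, hB, hlen, hflen⟩ :=
          ih (done ++ [r - 1]) ans (keep ++ [((done.length : Int) + 1, r - 1)])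
            (count + 1) fin (by simp; omega)
        rw [len_snoc_cast] at hB hflen
        refine ⟨(r - 1) :: todo'', ansApp, ?_, ?_, by simp [hlen], ?_⟩
        · rw [solInner]; simp only [hc, if_pos, hr]
          simpa [List.append_assoc] using hA
        · rw [filterNN_cons_pos _ _ _ (by omega), passLoop]
          rw [if_pos (by omega : N - count > 0), if_neg (by omega : ¬ r = 0)]
          rw [show N - count - 1 = N - (count + 1) from by ring, hB]
          rw [filterNN_cons_pos _ _ _ (by omega)]
          simp
        · rw [filterNN_cons_pos _ _ _ (by omega : (0:Int) ≤ r - 1),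
             filterNN_cons_pos _ _ _ (by omega : (0:Int) ≤ r)]
          simp only [List.length_cons]
          omega
      · by_cases hz : r = 0
        · -- finish branch
          subst hz
          obtain ⟨todo'', ansApp, hA, hB, hlen, hflen⟩ :=
            ih (done ++ [(-1 : Int)]) (ans ++ [(done.length : Int) + 1]) keep
              count (fin + 1) (by simp; omega)
          rw [len_snoc_cast] at hB hflen
          refine ⟨(-1) :: todo'', ((done.length : Int) + 1) :: ansApp, ?_, ?_, by simp [hlen], ?_⟩
          · rw [solInner]; simp only [hc, if_pos]
            rw [show count + fin + 1 = (done.length : Int) + 1 from by omega]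
            simpa [List.append_assoc] using hA
          · rw [filterNN_cons_pos _ _ _ (by omega), passLoop]
            rw [if_pos (by omega : N - count > 0), if_pos rfl, hB]
            rw [filterNN_cons_neg _ _ _ (by omega)]
            simp
          · rw [filterNN_cons_neg _ _ _ (by omega : ¬ (0:Int) ≤ -1),
               filterNN_cons_pos _ _ _ (by omega : (0:Int) ≤ 0)]
            simp only [List.length_cons]
            omega
        · -- skip branch (r < 0)
          obtain ⟨todo'', ansApp, hA, hB, hlen, hflen⟩ :=
            ih (done ++ [r]) ans keep count (fin + 1) (by simp; omega)
          rw [len_snoc_cast] at hB hflen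
          refine ⟨r :: todo'', ansApp, ?_, ?_, by simp [hlen], ?_⟩
          · rw [solInner]; simp only [hc, if_pos]
            rw [if_neg (by omega), if_neg hz]
            simpa [List.append_assoc] using hA
          · rw [filterNN_cons_neg _ _ _ (by omega), filterNN_cons_neg _ _ _ (by omega)]
            exact hB
          · rw [filterNN_cons_neg _ _ _ (by omega), filterNN_cons_neg _ _ _ (by omega)]
            exact hflen
    · -- budget exhausted: both loops stop
      refine ⟨r :: rest, [], ?_, ?_, rfl, by simp⟩
      · rw [solInner]; simp [hc]
      · cases hfe : filterNN ((done.length : Int) + 1) (r :: rest) with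
        | nil => simp [passLoop]
        | cons p ps =>
          obtain ⟨idx, rv⟩ := p
          rw [passLoop, if_neg (by omega : ¬ (N - count > 0))]
          simp

lemma solOuter_succ (fuel : Nat) (N : Int) (ct ans : List Int) :
    solOuter (fuel + 1) N ct ans
      = if ans.length < ct.length then
          solOuter fuel N (solInner N [] ct ans 0 0).1 (solInner N [] ct ans 0 0).2
        else ans := rfl

lemma altOuter_succ_cons (fuel : Nat) (N : Int) (p : Int × Int) (ps : List (Int × Int))
    (ans : List Int) :
    altOuter (fuel + 1) N (p :: ps) ans
      = altOuter fuel N (passLoop N (p :: ps) [] ans).1 (passLoop N (p :: ps) [] ans).2 := rfl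

lemma altOuter_succ_nil (fuel : Nat) (N : Int) (ans : List Int) :
    altOuter (fuel + 1) N [] ans = ans := rfl

lemma outer_sim (N : Int) (fuel : Nat) : ∀ (ct ans : List Int),
    ans.length + (filterNN 1 ct).length = ct.length →
    solOuter fuel N ct ans = altOuter fuel N (filterNN 1 ct) ans := by
  induction fuel with
  | zero => intro ct ans _; simp [solOuter, altOuter]
  | succ fuel ih =>
    intro ct ans hinv
    by_cases hlt : ans.length < ct.length
    · have hne : filterNN 1 ct ≠ [] := by
        intro hnil; rw [hnil] at hinv; simp at hinv; omega
      obtain ⟨todo', ansApp, hA, hB, hlen, hflen⟩ :=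
        pass_sim N ct [] ans ([] : List (Int × Int)) 0 0 (by simp)
      simp only [List.nil_append, List.length_nil, CharP.cast_eq_zero, sub_zero,
        zero_add] at hA hB hflen
      have hinv' : (ans ++ ansApp).length + (filterNN 1 todo').length = todo'.length := by
        simp only [List.length_append]; omega
      cases hfe : filterNN 1 ct with
      | nil => exact absurd hfe hne
      | cons p ps =>
        rw [hfe] at hB
        rw [solOuter_succ, if_pos hlt, altOuter_succ_cons, hA, hB]
        simpa [hlen] using ih todo' (ans ++ ansApp) hinv'
    · have hfe : filterNN 1 ct = [] := by
        have := filterNN_length_le ct 1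
        apply List.length_eq_zero_iff.mp
        omega
      rw [hfe, solOuter_succ, if_neg hlt, altOuter_succ_nil]

-- ===== VERDICT (by name: the statement is the Claim_ definition above) =====
theorem solution_spec : Claim_equal_solution := by
  intro N ct _ hpre
  unfold Spec_solution solution solution_alt
  have henum : filterNN 1 ct = PySem.List.enumerate ct 1 :=
    filterNN_all_nonneg ct 1 hpre.2
  have hlen : (filterNN 1 ct).length = ct.length := by
    rw [henum, PySem.List.length_enumerate]
  rw [← henum, outer_sim N (pvFuel ct) ct [] (by simp [hlen])]
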